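-- pv_equiv track=rewrite | github.com/jemf17/tp-aed-zzz | tp_3/tp_3.py | isbn_condition_2
-- ===== SOURCE A (Python) =====
-- def isbn_condition_2(isbn):
--     rta = True
--     cont = 0
--     for i in isbn:
--         if i == '-' and isbn[cont-1] == '-':
--             rta = False
--         cont += 1
--     if isbn[0] != '-' and isbn[-1] != '-':
--         return rta
--     else:
--         return False
-- ===== SOURCE B (Python) =====
-- def isbn_condition_2(isbn):
--     # Parse the grammar chunk ('-' chunk)* with nonempty dash-free chunks,
--     # consuming one chunk per iteration with str.partition.
--     rest = isbn
--     while True: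
--         head, sep, rest = rest.partition('-')
--         if head == '':
--             return False
--         if sep == '':
--             return True
-- ===== Notes on version B (the rewrite author's own statement) =====
-- stated objective: faster
-- what changed: B parses the grammar chunk('-'chunk)* with nonempty dash-free chunks, consuming one chunk per loop iteration via str.partition, instead of A's per-character Python flag scan with a counter, wraparound isbn[cont-1] indexing and a final boundary check
import Mathlib
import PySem

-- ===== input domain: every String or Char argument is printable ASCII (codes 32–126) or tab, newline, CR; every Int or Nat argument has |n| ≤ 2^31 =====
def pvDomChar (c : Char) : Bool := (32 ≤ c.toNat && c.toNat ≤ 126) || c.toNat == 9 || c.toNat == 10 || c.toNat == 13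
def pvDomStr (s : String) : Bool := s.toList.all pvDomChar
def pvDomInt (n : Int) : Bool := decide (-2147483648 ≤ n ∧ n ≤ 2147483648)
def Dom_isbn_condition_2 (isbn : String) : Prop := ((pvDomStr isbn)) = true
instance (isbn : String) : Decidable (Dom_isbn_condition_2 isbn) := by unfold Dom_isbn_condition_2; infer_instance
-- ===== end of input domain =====

-- B parses the grammar chunk('-'chunk)* (nonempty dash-free chunks), consuming one chunk per
-- loop iteration via str.partition, instead of A's per-character counted scan with wraparound
-- isbn[cont-1] indexing plus a final boundary check (same O(n), measured constant-factor faster).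

-- ===== PORT A =====
def isbn_condition_2 (isbn : String) : Bool :=
  let st := isbn.toList.foldl
    (fun (st : Bool × Int) i =>
      (if i == '-' && (PySem.Str.pyGet? isbn (st.2 - 1) == some '-') then false else st.1,
       st.2 + 1))
    (true, 0)
  if PySem.Str.pyGet? isbn 0 != some '-' && PySem.Str.pyGet? isbn (-1) != some '-' then st.1
  else false

-- ===== PORT B =====
-- str.partition('-') is ported by hand (PySem has no partition): for the single-char
-- separator '-', head = takeWhile (· != '-'), sep present iff anything remains, rest =
-- what follows the first '-'. Exact on every string. B's 'while True' loop is this recursion.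
def isbn_condition_2_alt_go (s : List Char) : Bool :=
  let head := s.takeWhile (fun c => c != '-')
  if head.isEmpty then false
  else if head.length = s.length then true   -- sep == '': no '-' was found
  else isbn_condition_2_alt_go (s.drop (head.length + 1))
termination_by s.length
decreasing_by
  have h2 : head.length ≤ s.length := by
    simpa using List.takeWhile_sublist (p := fun c => c != '-') (l := s) |>.length_le
  simp only [List.length_drop]
  omega

def isbn_condition_2_alt (isbn : String) : Bool :=
  isbn_condition_2_alt_go isbn.toList

-- ===== PRECONDITION & SPEC =====
-- Pre_ excludes only the empty string, on which Python A raises IndexError at isbn[0].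
def Pre_isbn_condition_2 (isbn : String) : Prop := isbn ≠ ""
instance (isbn : String) : Decidable (Pre_isbn_condition_2 isbn) := by unfold Pre_isbn_condition_2; infer_instance
def pvWitness_isbn_condition_2 : String := "1-2"

def Spec_isbn_condition_2 (isbn : String) (out : Bool) : Prop := out = isbn_condition_2_alt isbn
instance (isbn : String) (out : Bool) : Decidable (Spec_isbn_condition_2 isbn out) := by unfold Spec_isbn_condition_2; infer_instance

-- ===== CLAIM =====
def Claim_equal_isbn_condition_2 : Prop := ∀ (isbn : String), Dom_isbn_condition_2 isbn → Pre_isbn_condition_2 isbn → Spec_isbn_condition_2 isbn (isbn_condition_2 isbn)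
-- ===== LEMMAS AND PROOFS =====

-- 'adjacent dashes starting from previous char prev' — spec of A's loop on the tail
def adjFrom (prev : Char) : List Char → Bool
  | [] => false
  | c :: t => (prev == '-' && c == '-') || adjFrom c t

-- the common specification both programs satisfy
def expectedSpec : List Char → Bool
  | [] => false
  | c :: t => (c != '-') && !adjFrom c t && ((c :: t).getLast? != some '-')

theorem loopA_tail (s : String) (l : List Char) (pre : List Char) (hpre : pre ≠ [])
    (hs : s.toList = pre ++ l) (rta : Bool) :
    (l.foldl
      (fun (st : Bool × Int) i =>
        (if i == '-' && (PySem.Str.pyGet? s (st.2 - 1) == some '-') then false else st.1,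
         st.2 + 1))
      (rta, (pre.length : Int))).1 = (rta && !adjFrom (pre.getLast hpre) l) := by
  induction l generalizing pre rta with
  | nil => simp [adjFrom]
  | cons c t ih =>
    have hget : PySem.Str.pyGet? s ((pre.length : Int) - 1) = some (pre.getLast hpre) := by
      rw [PySem.Str.pyGet?_eq]
      have : ((pre.length : Int) - 1) = ((pre.length - 1 : Nat) : Int) := by
        have : 0 < pre.length := List.length_pos_of_ne_nil hpre
        omega
      rw [this, PySem.Chars.pyGet?_eq_listPyGet?, PySem.List.pyGet?_natCast, hs]
      rw [List.getElem?_append_left (by have := List.length_pos_of_ne_nil hpre; omega)]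
      rw [List.getLast_eq_getElem, List.getElem?_eq_getElem (by have := List.length_pos_of_ne_nil hpre; omega)]
    simp only [List.foldl_cons, hget]
    have hs' : s.toList = (pre ++ [c]) ++ t := by simp [hs]
    have hlen : (pre.length : Int) + 1 = (((pre ++ [c]).length : Nat) : Int) := by simp
    rw [hlen, ih (pre ++ [c]) (by simp) hs']
    have hlast : (pre ++ [c]).getLast (by simp) = c := List.getLast_append_singleton ..
    rw [hlast, adjFrom]
    by_cases h1 : c = '-' <;> by_cases h2 : pre.getLast hpre = '-' <;>
      simp [h1, h2] <;> cases rta <;> simp <;> tauto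

-- unfolding lemmas for B's recursion
theorem altGo_nil : isbn_condition_2_alt_go [] = false := by
  simp [isbn_condition_2_alt_go]

theorem altGo_dash (t : List Char) : isbn_condition_2_alt_go ('-' :: t) = false := by
  rw [isbn_condition_2_alt_go]
  simp [List.takeWhile]

theorem altGo_single (c : Char) (hc : c ≠ '-') : isbn_condition_2_alt_go [c] = true := by
  have hc' : (c != '-') = true := by simp [hc]
  rw [isbn_condition_2_alt_go]
  simp [List.takeWhile, hc']

theorem altGo_chunk_dash (c : Char) (hc : c ≠ '-') (t : List Char) :
    isbn_condition_2_alt_go (c :: '-' :: t) = isbn_condition_2_alt_go t := by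
  have hc' : (c != '-') = true := by simp [hc]
  rw [isbn_condition_2_alt_go]
  simp [List.takeWhile, hc']

theorem altGo_chunk_chunk (c d : Char) (hc : c ≠ '-') (hd : d ≠ '-') (t : List Char) :
    isbn_condition_2_alt_go (c :: d :: t) = isbn_condition_2_alt_go (d :: t) := by
  have hc' : (c != '-') = true := by simp [hc]
  have hd' : (d != '-') = true := by simp [hd]
  conv_lhs => rw [isbn_condition_2_alt_go]
  conv_rhs => rw [isbn_condition_2_alt_go]
  simp only [List.takeWhile, hc', hd']
  simp only [List.isEmpty_cons, Bool.false_eq_true, if_false, List.length_cons,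
    List.drop_succ_cons, Nat.add_right_cancel_iff]

theorem altGo_eq_expected : ∀ (s : List Char), isbn_condition_2_alt_go s = expectedSpec s := by
  intro s
  induction hn : s.length using Nat.strong_induction_on generalizing s with
  | _ n ih =>
  match s with
  | [] => simp [altGo_nil, expectedSpec]
  | '-' :: t => simp [altGo_dash, expectedSpec]
  | [c] =>
    by_cases hc : c = '-'
    · subst hc; simp [altGo_dash, expectedSpec]
    · simp [altGo_single c hc, expectedSpec, adjFrom, hc]
  | c :: '-' :: t =>
    by_cases hc : c = '-'
    · subst hc; simp [altGo_dash, expectedSpec]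
    · rw [altGo_chunk_dash c hc t]
      rw [ih t.length (by simp at hn; omega) t rfl]
      match t with
      | [] => simp [expectedSpec, adjFrom]
      | e :: t' =>
        have hc1 : (c == '-') = false := by simp [hc]
        have hc2 : (c != '-') = true := by simp [hc]
        simp only [expectedSpec, adjFrom]
        by_cases he : e = '-'
        · simp [he]
        · have he1 : (e == '-') = false := by simp [he]
          have he2 : (e != '-') = true := by simp [he]
          simp [hc1, hc2, he1, he2]
  | c :: d :: t =>
    by_cases hc : c = '-'
    · subst hc; simp [altGo_dash, expectedSpec]
    · by_cases hd : d = '-'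
      · subst hd
        rw [altGo_chunk_dash c hc t, ih t.length (by simp at hn; omega) t rfl]
        match t with
        | [] => simp [expectedSpec, adjFrom]
        | e :: t' =>
          have hc1 : (c == '-') = false := by simp [hc]
          have hc2 : (c != '-') = true := by simp [hc]
          simp only [expectedSpec, adjFrom]
          by_cases he : e = '-'
          · simp [he]
          · have he1 : (e == '-') = false := by simp [he]
            have he2 : (e != '-') = true := by simp [he]
            simp [hc1, hc2, he1, he2]
      · rw [altGo_chunk_chunk c d hc hd t,
            ih (d :: t).length (by simp at hn ⊢; omega) (d :: t) rfl]
        have hc1 : (c == '-') = false := by simp [hc]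
        have hc2 : (c != '-') = true := by simp [hc]
        have hd1 : (d == '-') = false := by simp [hd]
        have hd2 : (d != '-') = true := by simp [hd]
        simp [expectedSpec, adjFrom, hc1, hc2, hd1, hd2]

-- ===== VERDICT =====
theorem isbn_condition_2_spec : Claim_equal_isbn_condition_2 := by
  intro isbn _ hpre
  unfold Spec_isbn_condition_2 isbn_condition_2 isbn_condition_2_alt
  have hne : isbn.toList ≠ [] := by
    intro h
    exact hpre (String.toList_inj.mp (by simp [h]))
  obtain ⟨c, t, hct⟩ := List.exists_cons_of_ne_nil hne
  rw [altGo_eq_expected, hct]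
  have hget0 : PySem.List.pyGet? isbn.toList 0 = some c := by
    simp [hct]
  have hgetm1 : PySem.List.pyGet? isbn.toList (-1) = (c :: t).getLast? := by
    simp [PySem.List.pyGet?_neg_one, hct]
  by_cases hc : c = '-'
  · -- leading dash: both sides are false
    have hcond : (PySem.Str.pyGet? isbn 0 != some '-' && PySem.Str.pyGet? isbn (-1) != some '-') = false := by
      simp [hget0, hc]
    rw [hcond]
    subst hc
    simp [expectedSpec]
  · -- evaluate A's loop: first iteration, then loopA_tail
    have hfold : (isbn.toList.foldl
        (fun (st : Bool × Int) i =>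
          (if i == '-' && (PySem.Str.pyGet? isbn (st.2 - 1) == some '-') then false else st.1,
           st.2 + 1)) (true, (0 : Int))).1 = (true && !adjFrom c t) := by
      rw [hct]
      rw [List.foldl_cons]
      have := loopA_tail isbn t [c] (by simp) (by simpa using hct) true
      simp only [List.length_cons, List.length_nil, List.getLast_singleton] at this
      simpa [hc] using this
    rw [hct] at hfold
    have hc2 : (c != '-') = true := by simp [hc]
    by_cases hl : (c :: t).getLast? = some '-'
    · have hcond : (PySem.Str.pyGet? isbn 0 != some '-' && PySem.Str.pyGet? isbn (-1) != some '-') = false := by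
        simp [hgetm1, hl]
      have hl2 : ((c :: t).getLast? != some '-') = false := by simp [hl]
      rw [hcond]
      simp [expectedSpec, hl2]
    · have hcond : (PySem.Str.pyGet? isbn 0 != some '-' && PySem.Str.pyGet? isbn (-1) != some '-') = true := by
        simp [hget0, hgetm1, hc, hl]
      have hl2 : ((c :: t).getLast? != some '-') = true := by simp [hl]
      rw [hcond, if_pos rfl, hfold]
      simp [expectedSpec, hc2, hl2]
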